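-- pv_equiv track=rewrite | github.com/bassyu/ps | programmers/2_후보키.py | solution
-- ===== SOURCE A (Python) =====
-- from itertools import combinations
--
-- def solution(relation):
--     len_relation = len(relation)
--     len_column = len(relation[0])
--     column_numbers = [i for i in range(len_column)]
--
--     keys = list() # 모든키
--     for i in range(1, len_column+1):
--         keys.extend(combinations(column_numbers, i))
--
--     uniqueness = list()
--     for key in keys:
--         relation_key = list()
--         for row in relation:
--             relation_key.append(tuple([row[column] for column in key]))
--
--         if len(set(relation_key)) == len_relation:
--             uniqueness.append(set(key))
--
--     candidate = list()
--     while uniqueness: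
--         candidate.append(uniqueness.pop())
--         for key in uniqueness:
--             if candidate[-1] >= key:
--                 candidate.pop()
--                 break
--
--     return len(candidate)
-- ===== SOURCE B (Python) =====
-- from itertools import combinations
--
-- def solution(relation):
--     n = len(relation)
--     cols = len(relation[0])
--     minimal = []  # minimal unique keys found so far, discovered smallest-size first
--     for i in range(1, cols + 1):
--         for ks in combinations(range(cols), i):
--             s = set(ks)
--             # any superset of an already-found minimal key cannot be minimal
--             if any(s >= m for m in minimal):
--                 continue
--             if len({tuple(row[c] for c in ks) for row in relation}) == n:
--                 minimal.append(s)
--     return len(minimal)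
-- ===== Notes on version B (the rewrite author's own statement) =====
-- stated objective: alternative
-- what changed: A collects every unique column subset and then runs a second pop-and-compare phase that discards supersets; B is a single interleaved pass over subsets in increasing size that prunes supersets of already-found minimal keys before ever running the uniqueness test, so the second phase and the full 'uniqueness' list disappear.
import Mathlib
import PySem

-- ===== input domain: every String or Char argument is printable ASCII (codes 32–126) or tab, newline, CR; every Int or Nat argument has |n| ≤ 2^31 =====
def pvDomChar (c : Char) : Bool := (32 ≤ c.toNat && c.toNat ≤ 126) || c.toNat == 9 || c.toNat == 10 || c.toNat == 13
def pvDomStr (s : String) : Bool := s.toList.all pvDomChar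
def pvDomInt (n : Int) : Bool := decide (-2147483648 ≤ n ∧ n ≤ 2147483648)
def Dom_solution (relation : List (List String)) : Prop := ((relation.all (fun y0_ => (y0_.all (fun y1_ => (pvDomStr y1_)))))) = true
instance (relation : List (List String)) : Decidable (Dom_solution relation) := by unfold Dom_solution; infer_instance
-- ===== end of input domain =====

-- B merges A's two phases (collect all unique keys, then pop-and-compare away supersets) into one
-- smallest-size-first pass that prunes supersets of already-found minimal keys before testing uniqueness.


-- ===== PORT A =====
-- itertools.combinations(l, k): k-element subsequences of l, lexicographic (both Pythons call it)
def pvCombos : Nat → List Nat → List (List Nat)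
  | 0, _ => [[]]
  | _ + 1, [] => []
  | k + 1, x :: xs => (pvCombos k xs).map (fun c => x :: c) ++ pvCombos (k + 1) xs
  termination_by _k l => l.length

-- len(set(tuple(row[column] for column in key) for row in relation)) == len(relation)
-- (row.getD c "" = Python row[c]; exact for c < row.length, which Pre_solution guarantees)
def pvProjUnique (relation : List (List String)) (key : List Nat) : Bool :=
  PySem.Set.len
      (PySem.Set.ofList (relation.map (fun row => key.map (fun c => row.getD c ""))))
    == (relation.length : Int)

-- A's while-loop: pop the last unique key; keep it unless it is a superset of a remaining one
def pvPopLoop : List (PySem.Set Nat) → List (PySem.Set Nat) → List (PySem.Set Nat)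
  | [], cand => cand
  | x :: xs, cand =>
    let last := (x :: xs).getLast (by simp)
    let rest := (x :: xs).dropLast
    if rest.any (fun key => PySem.Set.issuperset last key) then pvPopLoop rest cand
    else pvPopLoop rest (cand ++ [last])
  termination_by uniq _ => uniq.length
  decreasing_by all_goals simp

def solution (relation : List (List String)) : Int :=
  match relation with
  | [] => 0  -- Python raises IndexError on relation[0]; excluded by Pre_solution
  | r0 :: _ =>
    let lenColumn := r0.length
    let columnNumbers := List.range lenColumn
    let keys := (List.range' 1 lenColumn).foldl
      (fun ks i => ks ++ pvCombos i columnNumbers) []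
    let uniqueness := keys.foldl
      (fun u key => if pvProjUnique relation key then u ++ [PySem.Set.ofList key] else u) []
    ((pvPopLoop uniqueness []).length : Int)

-- ===== PORT B =====
def solution_alt (relation : List (List String)) : Int :=
  match relation with
  | [] => 0  -- Python raises IndexError on relation[0]; excluded by Pre_solution
  | r0 :: _ =>
    let cols := r0.length
    let minimal := (List.range' 1 cols).foldl
      (fun acc i =>
        (pvCombos i (List.range cols)).foldl
          (fun m ks =>
            let s := PySem.Set.ofList ks
            if m.any (fun mm => PySem.Set.issuperset s mm) then m
            else if pvProjUnique relation ks then m ++ [s] else m)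
          acc)
      []
    (minimal.length : Int)

-- ===== PRECONDITION & SPEC =====
-- Pre_ excludes exactly the inputs where Python A raises IndexError: the empty relation
-- (relation[0]) and relations with a row shorter than the first row (row[column]).
def Pre_solution (relation : List (List String)) : Prop :=
  relation ≠ [] ∧ ∀ row ∈ relation, (relation.headD []).length ≤ row.length
instance (relation : List (List String)) : Decidable (Pre_solution relation) := by
  unfold Pre_solution; infer_instance
def pvWitness_solution : List (List String) := [["a", "1"], ["b", "1"]]

def Spec_solution (relation : List (List String)) (out : Int) : Prop := out = solution_alt relation
instance (relation : List (List String)) (out : Int) : Decidable (Spec_solution relation out) := by unfold Spec_solution; infer_instance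

-- ===== CLAIM (what is proved, stated in full; the proofs are below) =====
def Claim_equal_solution : Prop := ∀ (relation : List (List String)), Dom_solution relation → Pre_solution relation → Spec_solution relation (solution relation)

-- ===== LEMMAS AND PROOFS =====

theorem pv_sup_refl {a : PySem.Set Nat} : PySem.Set.issuperset a a = true := by
  simp [PySem.Set.issuperset, PySem.Set.issubset, PySem.Set.contains]

theorem pv_sup_trans {a b c : PySem.Set Nat}
    (h1 : PySem.Set.issuperset a b = true) (h2 : PySem.Set.issuperset b c = true) :
    PySem.Set.issuperset a c = true := by
  simp only [PySem.Set.issuperset, PySem.Set.issubset, PySem.Set.contains,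
    List.all_eq_true, List.contains_iff_mem] at *
  exact fun x hx => h1 x (h2 x hx)

-- count, left to right, of the elements that are a superset of no earlier element
def pvKeepCount (seen : List (PySem.Set Nat)) : List (PySem.Set Nat) → Nat
  | [] => 0
  | x :: xs =>
    (if seen.any (fun u => PySem.Set.issuperset x u) then 0 else 1) +
      pvKeepCount (seen ++ [x]) xs

theorem pvKeepCount_snoc (L : List (PySem.Set Nat)) (a : PySem.Set Nat) :
    ∀ seen, pvKeepCount seen (L ++ [a]) =
      pvKeepCount seen L +
        (if (seen ++ L).any (fun u => PySem.Set.issuperset a u) then 0 else 1) := by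
  induction L with
  | nil => intro seen; simp [pvKeepCount]
  | cons x xs ih =>
    intro seen
    simp only [List.cons_append, pvKeepCount, ih (seen ++ [x]), List.append_assoc,
      List.nil_append]
    omega

theorem pvPopLoop_snoc (L : List (PySem.Set Nat)) (a : PySem.Set Nat)
    (cand : List (PySem.Set Nat)) :
    pvPopLoop (L ++ [a]) cand =
      if L.any (fun key => PySem.Set.issuperset a key) then pvPopLoop L cand
      else pvPopLoop L (cand ++ [a]) := by
  match h : L ++ [a] with
  | [] => simp at h
  | x :: xs =>
    rw [pvPopLoop]
    have hlast : (x :: xs).getLast (by simp) = a := by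
      have h1 : (x :: xs).getLast? = some a := by rw [← h]; exact List.getLast?_concat
      rw [List.getLast?_eq_some_getLast (by simp)] at h1
      exact Option.some_inj.mp h1
    have hdrop : (x :: xs).dropLast = L := by rw [← h]; exact List.dropLast_concat
    simp only [hlast, hdrop]

theorem pvPopLoop_length (L : List (PySem.Set Nat)) :
    ∀ cand, (pvPopLoop L cand).length = cand.length + pvKeepCount [] L := by
  induction L using List.reverseRecOn with
  | nil => intro cand; simp [pvPopLoop, pvKeepCount]
  | append_singleton L a ih =>
    intro cand
    rw [pvPopLoop_snoc, pvKeepCount_snoc, List.nil_append]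
    by_cases h : L.any (fun key => PySem.Set.issuperset a key)
    · simp [h, ih]
    · simp [h, ih]; omega

-- B's pruning loop over the already-filtered list of unique keys
def pvSel (acc : List (PySem.Set Nat)) : List (PySem.Set Nat) → List (PySem.Set Nat)
  | [] => acc
  | x :: xs =>
    pvSel (if acc.any (fun mm => PySem.Set.issuperset x mm) then acc else acc ++ [x]) xs

-- core invariant: pruning against the kept (minimal) keys counts exactly the elements
-- that are a superset of no earlier element at all
theorem pvSel_length (L : List (PySem.Set Nat)) :
    ∀ acc seen, (∀ m ∈ acc, m ∈ seen) →
      (∀ u ∈ seen, ∃ m ∈ acc, PySem.Set.issuperset u m = true) →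
      (pvSel acc L).length = acc.length + pvKeepCount seen L := by
  induction L with
  | nil => intro acc seen _ _; simp [pvSel, pvKeepCount]
  | cons x xs ih =>
    intro acc seen h1 h2
    by_cases hs : seen.any (fun u => PySem.Set.issuperset x u)
    · have hacc : acc.any (fun mm => PySem.Set.issuperset x mm) = true := by
        simp only [List.any_eq_true] at hs ⊢
        obtain ⟨u, hu, hxu⟩ := hs
        obtain ⟨m, hm, hum⟩ := h2 u hu
        exact ⟨m, hm, pv_sup_trans hxu hum⟩
      simp only [pvSel, pvKeepCount, hacc, hs, if_pos]
      rw [ih acc (seen ++ [x]) (fun m hm => by simp [h1 m hm])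
        (fun u hu => by
          rcases List.mem_append.mp hu with h | h
          · exact h2 u h
          · simp only [List.mem_singleton] at h
            subst h
            simp only [List.any_eq_true] at hs
            obtain ⟨v, hv, hxv⟩ := hs
            obtain ⟨m, hm, hvm⟩ := h2 v hv
            exact ⟨m, hm, pv_sup_trans hxv hvm⟩)]
      omega
    · have hacc : acc.any (fun mm => PySem.Set.issuperset x mm) = false := by
        by_contra hc
        simp only [Bool.not_eq_false, List.any_eq_true] at hc
        obtain ⟨m, hm, hxm⟩ := hc
        apply hs
        rw [List.any_eq_true]
        exact ⟨m, h1 m hm, hxm⟩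
      simp only [pvSel, pvKeepCount, hacc, hs, if_false, Bool.false_eq_true]
      rw [ih (acc ++ [x]) (seen ++ [x])
        (fun m hm => by
          rcases List.mem_append.mp hm with h | h
          · exact List.mem_append.mpr (Or.inl (h1 m h))
          · exact List.mem_append.mpr (Or.inr h))
        (fun u hu => by
          rcases List.mem_append.mp hu with h | h
          · obtain ⟨m, hm, hum⟩ := h2 u h
            exact ⟨m, List.mem_append.mpr (Or.inl hm), hum⟩
          · simp only [List.mem_singleton] at h
            exact ⟨x, List.mem_append.mpr (Or.inr (by simp)), by rw [h]; exact pv_sup_refl⟩)]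
      simp; omega

-- B's inner fold over raw combinations = pvSel over the filtered, set-ified list
theorem pvFoldB_eq_sel (relation : List (List String)) (K : List (List Nat)) :
    ∀ acc, K.foldl
        (fun m ks =>
          let s := PySem.Set.ofList ks
          if m.any (fun mm => PySem.Set.issuperset s mm) then m
          else if pvProjUnique relation ks then m ++ [s] else m)
        acc
      = pvSel acc ((K.filter (pvProjUnique relation)).map PySem.Set.ofList) := by
  induction K with
  | nil => intro acc; simp [pvSel]
  | cons k ks ih =>
    intro acc
    by_cases hp : pvProjUnique relation k
    · simp only [List.foldl_cons, List.filter_cons_of_pos hp, List.map_cons, pvSel, ih, hp,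
        if_true]
    · simp only [List.foldl_cons, List.filter_cons_of_neg hp, ih]
      by_cases hq : acc.any (fun mm => PySem.Set.issuperset (PySem.Set.ofList k) mm) <;>
        simp [hq, hp]

-- ===== VERDICT (by name: the statement is the Claim_ definition above) =====
theorem solution_spec : Claim_equal_solution := by
  intro relation _ _
  unfold Spec_solution
  match relation with
  | [] => rfl
  | r0 :: rest =>
    unfold solution solution_alt
    simp only
    set relation := r0 :: rest
    set K := ((List.range' 1 r0.length).map
      (fun i => pvCombos i (List.range r0.length))).flatten with hK
    have hkeys : (List.range' 1 r0.length).foldl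
        (fun ks i => ks ++ pvCombos i (List.range r0.length)) [] = K := by
      rw [hK]
      have : ∀ (l : List Nat) (acc : List (List Nat)),
          l.foldl (fun ks i => ks ++ pvCombos i (List.range r0.length)) acc
            = acc ++ (l.map (fun i => pvCombos i (List.range r0.length))).flatten := by
        intro l
        induction l with
        | nil => intro acc; simp
        | cons y ys ih => intro acc; simp [ih, List.append_assoc]
      simp [this (List.range' 1 r0.length) []]
    rw [hkeys, PySem.List.foldl_append_if (pvProjUnique relation) PySem.Set.ofList K []]
    have hB : (List.range' 1 r0.length).foldl
        (fun acc i =>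
          (pvCombos i (List.range r0.length)).foldl
            (fun m ks =>
              let s := PySem.Set.ofList ks
              if m.any (fun mm => PySem.Set.issuperset s mm) then m
              else if pvProjUnique relation ks then m ++ [s] else m)
            acc)
        []
        = pvSel [] ((K.filter (pvProjUnique relation)).map PySem.Set.ofList) := by
      rw [hK, ← List.foldl_map, ← List.foldl_flatten, pvFoldB_eq_sel]
    rw [hB, pvPopLoop_length, pvSel_length _ [] [] (by simp) (by simp)]
    simp
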